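-- pv_equiv track=rewrite | github.com/DRMF/DRMF-Seeding-Project | KLS-main-page/modMain.py | remOpt
-- ===== SOURCE A (Python) =====
-- def remOpt(p):
--     parse = True
--     ret = ""
--     for x in p:
--         if parse:
--             if x == "[":
--                 parse = False
--             else:
--                 ret += x
--         else:
--             if x == "]":
--                 parse = True
--     return ret
-- ===== SOURCE B (Python) =====
-- def remOpt(p):
--     parts = []
--     i = 0
--     while True:
--         j = p.find('[', i)
--         if j == -1:
--             parts.append(p[i:])
--             break
--         parts.append(p[i:j])
--         k = p.find(']', j)
--         if k == -1:
--             break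
--         i = k + 1
--     return ''.join(parts)
-- ===== Notes on version B (the rewrite author's own statement) =====
-- stated objective: faster
-- what changed: Replaces the per-character parse-state toggle and character-by-character string concatenation with find-based segment jumps that copy whole slices and join them once.
import Mathlib
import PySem

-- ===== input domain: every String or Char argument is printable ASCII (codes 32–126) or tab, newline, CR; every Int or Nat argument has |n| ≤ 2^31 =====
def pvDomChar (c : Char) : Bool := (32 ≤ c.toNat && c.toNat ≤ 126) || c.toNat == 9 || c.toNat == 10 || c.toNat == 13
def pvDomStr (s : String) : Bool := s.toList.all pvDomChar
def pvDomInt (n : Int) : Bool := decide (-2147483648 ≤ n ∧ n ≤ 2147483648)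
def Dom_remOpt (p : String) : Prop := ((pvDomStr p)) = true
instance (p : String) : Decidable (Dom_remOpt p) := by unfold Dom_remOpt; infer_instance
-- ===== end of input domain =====

-- B replaces A's per-character parse-state toggle with segment jumps: copy the slice up to each '[', skip to the matching ']', repeat (objective: alternative).


-- ===== PORT A =====
-- state machine: (parse flag, accumulated chars); string concat ret += x rendered as list append
def remOptStep (s : Bool × List Char) (x : Char) : Bool × List Char :=
  if s.1 then
    if x = '[' then (false, s.2) else (s.1, s.2 ++ [x])
  else
    if x = ']' then (true, s.2) else (s.1, s.2)

def remOpt (p : String) : String :=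
  String.mk (p.toList.foldl remOptStep (true, [])).2

-- ===== PORT B =====
-- segment-jump loop of Source B: emit the slice up to the next '[', skip past the next ']' (drop the tail if unclosed)
def remOptAltGo (cs : List Char) : List Char :=
  let pre := cs.takeWhile (· ≠ '[')          -- p[i:j] (or p[i:] when j == -1)
  let rest := cs.dropWhile (· ≠ '[')
  if _hr : rest.isEmpty then pre             -- j == -1: append p[i:], stop
  else
    let rest2 := rest.tail.dropWhile (· ≠ ']')
    if _hk : rest2.isEmpty then pre          -- k == -1: drop the unclosed tail
    else pre ++ remOptAltGo rest2.tail       -- i = k + 1, continue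
termination_by cs.length
decreasing_by
  have h1 : (cs.dropWhile (· ≠ '[')).length ≤ cs.length := List.length_dropWhile_le _ _
  have h2 : ((cs.dropWhile (· ≠ '[')).tail.dropWhile (· ≠ ']')).length ≤ (cs.dropWhile (· ≠ '[')).tail.length :=
    List.length_dropWhile_le _ _
  simp only [List.isEmpty_iff] at _hr _hk
  have h3 : (cs.dropWhile (· ≠ '[')).tail.length + 1 = (cs.dropWhile (· ≠ '[')).length := by
    cases h : cs.dropWhile (· ≠ '[') with
    | nil => exact absurd h _hr
    | cons a b => simp
  have h4 : ((cs.dropWhile (· ≠ '[')).tail.dropWhile (· ≠ ']')).tail.length + 1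
      = ((cs.dropWhile (· ≠ '[')).tail.dropWhile (· ≠ ']')).length := by
    cases h : (cs.dropWhile (· ≠ '[')).tail.dropWhile (· ≠ ']') with
    | nil => exact absurd h _hk
    | cons a b => simp
  omega

def remOpt_alt (p : String) : String := String.mk (remOptAltGo p.toList)

-- ===== PRECONDITION & SPEC =====
def Spec_remOpt (p : String) (out : String) : Prop := out = remOpt_alt p
instance (p : String) (out : String) : Decidable (Spec_remOpt p out) := by unfold Spec_remOpt; infer_instance

-- ===== CLAIM (what is proved, stated in full; the proofs are below) =====
def Claim_equal_remOpt : Prop := ∀ (p : String), Dom_remOpt p → Spec_remOpt p (remOpt p)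

-- ===== LEMMAS AND PROOFS =====

-- what the fold computes in the non-parsing state: skip to ']' then continue with remOptAltGo
def remOptSkip (cs : List Char) : List Char :=
  let r := cs.dropWhile (· ≠ ']')
  if r.isEmpty then [] else remOptAltGo r.tail

theorem remOptAltGo_bracket (t : List Char) :
    remOptAltGo ('[' :: t) = remOptSkip t := by
  unfold remOptAltGo remOptSkip
  simp [List.takeWhile_cons, List.dropWhile_cons]

theorem remOptAltGo_cons (x : Char) (t : List Char) (hx : x ≠ '[') :
    remOptAltGo (x :: t) = x :: remOptAltGo t := by
  conv_lhs => unfold remOptAltGo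
  conv_rhs => unfold remOptAltGo
  simp only [List.takeWhile_cons, List.dropWhile_cons, hx, decide_not, decide_eq_true_eq,
    ite_true, ite_false, if_pos, decide_true, decide_false]
  simp [hx]
  split_ifs <;> simp

theorem remOptSkip_cons (x : Char) (t : List Char) (hx : x ≠ ']') :
    remOptSkip (x :: t) = remOptSkip t := by
  unfold remOptSkip
  simp [List.dropWhile_cons, hx]

theorem remOptSkip_bracket (t : List Char) :
    remOptSkip (']' :: t) = remOptAltGo t := by
  unfold remOptSkip
  simp [List.dropWhile_cons]

theorem remOpt_fold (cs : List Char) :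
    (∀ acc, (cs.foldl remOptStep (true, acc)).2 = acc ++ remOptAltGo cs) ∧
    (∀ acc, (cs.foldl remOptStep (false, acc)).2 = acc ++ remOptSkip cs) := by
  induction cs with
  | nil =>
    constructor <;> intro acc <;> [skip; simp [remOptSkip]]
    unfold remOptAltGo
    simp
  | cons x t ih =>
    constructor
    · intro acc
      by_cases hx : x = '['
      · subst hx
        simp only [List.foldl_cons, remOptStep, if_pos, ite_true]
        simp [ih.2, remOptAltGo_bracket]
      · simp only [List.foldl_cons, remOptStep, hx, ite_false, if_pos]
        simp [ih.1, remOptAltGo_cons x t hx]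
    · intro acc
      by_cases hx : x = ']'
      · subst hx
        simp only [List.foldl_cons, remOptStep, ite_true, ite_false, if_neg]
        simp [ih.1, remOptSkip_bracket]
      · simp only [List.foldl_cons, remOptStep, hx, ite_false, if_neg]
        simp [ih.2, remOptSkip_cons x t hx]

-- ===== VERDICT (by name: the statement is the Claim_ definition above) =====
theorem remOpt_spec : Claim_equal_remOpt := by
  intro p _
  unfold Spec_remOpt remOpt remOpt_alt
  rw [(remOpt_fold p.toList).1 []]
  simp
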